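-- pv_equiv track=rewrite | github.com/Kimchikilla/modoo-startup-predictor | scripts/merge_scores.py | hist
-- ===== SOURCE A (Python) =====
-- from collections import defaultdict
--
-- def hist(rows):
--     h = defaultdict(int)
--     for r in rows:
--         h[r["total"]] += 1
--     out = []
--     for t in range(3, 31):
--         out.append((t, h[t]))
--     return out
-- ===== SOURCE B (Python) =====
-- def hist(rows):
--     rows = list(rows)
--     return [(t, sum(1 for r in rows if r["total"] == t)) for t in range(3, 31)]
-- ===== Notes on version B (the rewrite author's own statement) =====
-- stated objective: alternative
-- what changed: Replaces the defaultdict counting pass plus indexed read-out with an inverted traversal: for each t in 3..30 the rows are scanned and the matching rows counted directly, so no hash table is built.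
import Mathlib
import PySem

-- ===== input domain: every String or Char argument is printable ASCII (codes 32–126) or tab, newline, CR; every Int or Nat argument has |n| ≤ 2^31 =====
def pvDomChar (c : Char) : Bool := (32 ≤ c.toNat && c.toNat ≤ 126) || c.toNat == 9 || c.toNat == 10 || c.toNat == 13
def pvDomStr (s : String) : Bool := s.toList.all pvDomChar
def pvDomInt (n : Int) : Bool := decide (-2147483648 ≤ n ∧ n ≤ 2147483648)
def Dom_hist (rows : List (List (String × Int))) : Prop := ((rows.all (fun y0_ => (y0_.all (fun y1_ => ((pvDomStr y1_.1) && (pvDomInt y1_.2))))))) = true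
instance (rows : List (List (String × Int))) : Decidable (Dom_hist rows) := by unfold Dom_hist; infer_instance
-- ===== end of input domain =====

-- B inverts the traversal: instead of building a hash table of counts in one pass and
-- reading it back, it loops t over 3..30 and counts matching rows by a direct scan.

-- r["total"]: first-match association-list lookup (Pre_hist guarantees the key is present,
-- so the .getD 0 default is never the result)
def pyGetTotal (r : List (String × Int)) : Int :=
  ((r.find? (fun p => p.1 == "total")).map Prod.snd).getD 0

-- ===== PORT A =====
def hist (rows : List (List (String × Int))) : List (Int × Int) :=
  let h := rows.foldl (fun h r => PySem.Dict.modify h (pyGetTotal r) 0 (· + 1)) PySem.Dict.empty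
  (PySem.List.pyRange 3 31 1).foldl (fun out t => out ++ [(t, h.getD t 0)]) []

-- ===== PORT B =====
def hist_alt (rows : List (List (String × Int))) : List (Int × Int) :=
  (PySem.List.pyRange 3 31 1).map
    (fun t => (t, rows.foldl (fun acc r => if pyGetTotal r == t then acc + 1 else acc) (0 : Int)))

-- ===== PRECONDITION & SPEC =====
-- Pre_hist excludes rows without a "total" key, on which the Python A raises KeyError.
def Pre_hist (rows : List (List (String × Int))) : Prop :=
  (rows.all (fun r => r.any (fun p => p.1 == "total"))) = true
instance (rows : List (List (String × Int))) : Decidable (Pre_hist rows) := by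
  unfold Pre_hist; infer_instance
def pvWitness_hist : (List (List (String × Int))) := [[("total", 3)], [("total", 7)]]

def Spec_hist (rows : List (List (String × Int))) (out : List (Int × Int)) : Prop := out = hist_alt rows
instance (rows : List (List (String × Int))) (out : List (Int × Int)) : Decidable (Spec_hist rows out) := by unfold Spec_hist; infer_instance

-- ===== CLAIM (what is proved, stated in full; the proofs are below) =====
def Claim_equal_hist : Prop := ∀ (rows : List (List (String × Int))), Dom_hist rows → Pre_hist rows → Spec_hist rows (hist rows)

-- ===== LEMMAS AND PROOFS =====

-- A's output loop: appending one pair per t is the map over the range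
theorem foldl_append_pair (f : Int → Int) :
    ∀ (l : List Int) (acc : List (Int × Int)),
      l.foldl (fun out t => out ++ [(t, f t)]) acc = acc ++ l.map (fun t => (t, f t)) := by
  intro l
  induction l with
  | nil => simp [List.foldl]
  | cons x xs ih => intro acc; simp [List.foldl, ih]

-- B's inner loop: the conditional accumulator counts the occurrences of t among the totals
theorem foldl_count (t : Int) :
    ∀ (rows : List (List (String × Int))) (acc : Int),
      rows.foldl (fun acc r => if pyGetTotal r == t then acc + 1 else acc) acc
        = acc + ((rows.map pyGetTotal).count t : Int) := by
  intro rows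
  induction rows with
  | nil => simp [List.foldl]
  | cons r rs ih =>
      intro acc
      simp only [List.foldl_cons, List.map_cons, List.count_cons, ih]
      by_cases h : pyGetTotal r = t
      · subst h
        simp only [beq_self_eq_true, if_pos]
        push_cast
        ring
      · have h2 : (pyGetTotal r == t) = false := by
          rw [beq_eq_false_iff_ne]; exact h
        simp only [h2, if_neg, Bool.false_eq_true, not_false_iff]
        push_cast
        ring

-- A's counting dict, read at t, is the same count
theorem dict_count (rows : List (List (String × Int))) (t : Int) :
    (rows.foldl (fun h r => PySem.Dict.modify h (pyGetTotal r) 0 (· + 1)) PySem.Dict.empty).getD t 0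
      = ((rows.map pyGetTotal).count t : Int) := by
  have h := PySem.Dict.getD_foldl_modify_add_one (l := rows.map pyGetTotal)
      (d := PySem.Dict.empty) (v := t)
  rw [List.foldl_map] at h
  simpa [PySem.Dict.getD_empty] using h

-- ===== VERDICT (by name: the statement is the Claim_ definition above) =====
theorem hist_spec : Claim_equal_hist := by
  intro rows _ _
  unfold Spec_hist hist hist_alt
  rw [foldl_append_pair]
  simp only [List.nil_append]
  apply List.map_congr_left
  intro t _
  rw [foldl_count, dict_count]
  simp
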